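-- pv_equiv track=rewrite | github.com/Juniper/healthbot-rules | juniper_official/Solutions/CGNAT/cgnat_multirow.py | max_session_count
-- ===== SOURCE A (Python) =====
-- def max_session_count(list_session_count, list_internal_ip):
--     max_value = 0
--     unique_session_count = dict()
--     for val1, val2 in zip(list_internal_ip, list_session_count):
--         if val1 in unique_session_count:
--             unique_session_count[val1] = unique_session_count[val1] + val2
--         else:
--             unique_session_count[val1] = val2
--     max_value = unique_session_count.get(max(unique_session_count, key=unique_session_count.get))
--     return max_value
-- ===== SOURCE B (Python) =====
-- def max_session_count(list_session_count, list_internal_ip):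
--     pairs = sorted(zip(list_internal_ip, list_session_count), key=lambda p: p[0])
--     totals = []
--     i = 0
--     n = len(pairs)
--     while i < n:
--         j = i
--         run = 0
--         while j < n and pairs[j][0] == pairs[i][0]:
--             run += pairs[j][1]
--             j += 1
--         totals.append(run)
--         i = j
--     return max(totals)
-- ===== Notes on version B (the rewrite author's own statement) =====
-- stated objective: alternative
-- what changed: Replaces A's incremental dict accumulation plus a keyed max-over-keys lookup by sorting the zipped pairs by IP, scanning contiguous equal-IP runs to sum each run, and taking a plain max over the run totals.
import Mathlib
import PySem

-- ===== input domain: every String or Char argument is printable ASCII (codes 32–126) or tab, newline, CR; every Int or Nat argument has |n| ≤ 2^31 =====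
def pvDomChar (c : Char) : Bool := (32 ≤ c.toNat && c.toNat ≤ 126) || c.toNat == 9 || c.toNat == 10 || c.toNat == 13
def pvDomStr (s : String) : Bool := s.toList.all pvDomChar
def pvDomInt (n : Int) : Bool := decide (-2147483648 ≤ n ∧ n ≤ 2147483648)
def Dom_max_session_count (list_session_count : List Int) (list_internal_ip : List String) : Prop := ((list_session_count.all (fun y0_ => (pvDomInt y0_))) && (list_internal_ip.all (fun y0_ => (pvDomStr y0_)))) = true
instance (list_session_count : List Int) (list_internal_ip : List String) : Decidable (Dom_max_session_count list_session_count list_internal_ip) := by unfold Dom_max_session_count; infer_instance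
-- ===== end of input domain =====

-- B replaces A's dict accumulation + keyed max-over-keys lookup by sort-by-IP, a contiguous-run scan summing each run, and a plain max over the run totals (alternative algorithm, same results).


-- ===== PORT A =====
-- dict-accumulation loop, then max over the keys with key = dict.get (the key is in the
-- dict wherever the key function is evaluated, so .get is ported as getD _ 0), then the
-- value at that key; the elim-default 0 is Python's ValueError on the empty dict (excluded by Pre_).
def max_session_count (list_session_count : List Int) (list_internal_ip : List String) : Int :=
  let d := (list_internal_ip.zip list_session_count).foldl
    (fun d p => if d.contains p.1 then d.insert p.1 (d.getD p.1 0 + p.2) else d.insert p.1 p.2)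
    PySem.Dict.empty
  (PySem.List.max? d.keys (fun k => d.getD k 0)).elim 0 (fun k => d.getD k 0)

-- ===== PORT B =====
-- B sorts the zipped pairs by IP and scans contiguous equal-key runs, summing each run;
-- the outer while-loop is the recursion, the inner run-collecting while-loop is the
-- takeWhile/dropWhile split at the current key; then a plain max over the run totals
-- (the elim-default 0 is Python's ValueError on the empty list, excluded by Pre_).
def pvGroupSums : List (String × Int) → List Int
  | [] => []
  | (k, c) :: t =>
      (c + ((t.takeWhile (fun p => p.1 == k)).map (fun p => p.2)).sum)
        :: pvGroupSums (t.dropWhile (fun p => p.1 == k))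
termination_by l => l.length
decreasing_by
  simp only [List.length_cons]
  exact Nat.lt_succ_of_le (List.length_dropWhile_le _ _)

def max_session_count_alt (list_session_count : List Int) (list_internal_ip : List String) : Int :=
  let pairs := PySem.List.sorted (list_internal_ip.zip list_session_count) (fun p => p.1) false
  let totals := pvGroupSums pairs
  (PySem.List.max? totals (fun x => x)).elim 0 (fun m => m)

-- ===== PRECONDITION & SPEC =====
-- Pre_ excludes exactly the inputs where zip() is empty: there Python A raises ValueError (max of an empty dict), and so does B.
def Pre_max_session_count (list_session_count : List Int) (list_internal_ip : List String) : Prop :=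
  list_session_count ≠ [] ∧ list_internal_ip ≠ []
instance (list_session_count : List Int) (list_internal_ip : List String) : Decidable (Pre_max_session_count list_session_count list_internal_ip) := by unfold Pre_max_session_count; infer_instance

def pvWitness_max_session_count : List Int × List String := ([3, 4, 5], ["a", "b", "a"])

def Spec_max_session_count (list_session_count : List Int) (list_internal_ip : List String) (out : Int) : Prop := out = max_session_count_alt list_session_count list_internal_ip
instance (list_session_count : List Int) (list_internal_ip : List String) (out : Int) : Decidable (Spec_max_session_count list_session_count list_internal_ip out) := by unfold Spec_max_session_count; infer_instance

-- ===== CLAIM (what is proved, stated in full; the proofs are below) =====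
def Claim_equal_max_session_count : Prop := ∀ (list_session_count : List Int) (list_internal_ip : List String), Dom_max_session_count list_session_count list_internal_ip → Pre_max_session_count list_session_count list_internal_ip → Spec_max_session_count list_session_count list_internal_ip (max_session_count list_session_count list_internal_ip)

-- ===== LEMMAS AND PROOFS =====

-- mapping the key function through max? turns a keyed max into a plain max over the mapped list
theorem pv_foldl_max_map {α : Type} (xs : List α) (f : α → Int) (acc : Option α) :
    (xs.foldl
      (fun acc x => match acc with
        | none => some x
        | some m => if f m < f x then some x else some m) acc).map f
    = (xs.map f).foldl
      (fun acc y => match acc with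
        | none => some y
        | some m => if m < y then some y else some m) (acc.map f) := by
  induction xs generalizing acc with
  | nil => rfl
  | cons x t ih =>
    cases acc with
    | none => simpa using ih (some x)
    | some m =>
      by_cases h : f m < f x <;> simp [h, ih]

theorem pv_max?_map {α : Type} (xs : List α) (f : α → Int) :
    (PySem.List.max? xs f).map f = PySem.List.max? (xs.map f) (fun x => x) := by
  have h1 : PySem.List.max? xs f = xs.foldl
      (fun acc x => match acc with
        | none => some x
        | some m => if f m < f x then some x else some m) none := by
    unfold PySem.List.max?; congr 1
  have h2 : PySem.List.max? (xs.map f) (fun x => x) = (xs.map f).foldl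
      (fun acc y => match acc with
        | none => some y
        | some m => if m < y then some y else some m) none := by
    unfold PySem.List.max?; congr 1; funext acc y; cases acc <;> rfl
  rw [h1, h2]
  simpa using pv_foldl_max_map xs f none

theorem pv_elim_max_map {α : Type} (xs : List α) (f : α → Int) :
    (PySem.List.max? xs f).elim 0 f
    = (PySem.List.max? (xs.map f) (fun x => x)).elim 0 (fun m => m) := by
  rw [← pv_max?_map]
  cases h : PySem.List.max? xs f <;> simp

-- the value of max() only depends on the multiset of elements
theorem pv_max_perm (xs ys : List Int) (h : xs.Perm ys) :
    (PySem.List.max? xs (fun x => x)).elim 0 (fun m => m)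
    = (PySem.List.max? ys (fun x => x)).elim 0 (fun m => m) := by
  cases hx : PySem.List.max? xs (fun x => x) with
  | none =>
    have hxs : xs = [] := (PySem.List.max?_eq_none_iff _ _).mp hx
    have hys : ys = [] := (hxs ▸ h).symm.eq_nil
    subst hxs; subst hys; rfl
  | some m1 =>
    cases hy : PySem.List.max? ys (fun x => x) with
    | none =>
      have hys : ys = [] := (PySem.List.max?_eq_none_iff _ _).mp hy
      subst hys
      have : xs = [] := h.eq_nil
      subst this
      simp [PySem.List.max?] at hx
    | some m2 =>
      have h1 : m1 ∈ ys := h.mem_iff.mp (PySem.List.max?_mem hx)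
      have h2 : m2 ∈ xs := h.mem_iff.mpr (PySem.List.max?_mem hy)
      have le1 : m1 ≤ m2 := PySem.List.max?_isMax hy m1 h1
      have le2 : m2 ≤ m1 := PySem.List.max?_isMax hx m2 h2
      simp [le_antisymm le1 le2]

-- the dict value at k after the accumulation loop is the start value plus the sum of counts keyed k
theorem pv_getD_foldl_insert_sum (l : List (String × Int)) (d : PySem.Dict String Int) (k : String) :
    (l.foldl (fun d p => d.insert p.1 (d.getD p.1 0 + p.2)) d).getD k 0
    = d.getD k 0 + ((l.filter (fun p => p.1 == k)).map (fun p => p.2)).sum := by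
  induction l generalizing d with
  | nil => simp
  | cons p t ih =>
    by_cases h : p.1 = k
    · simp [List.foldl_cons, ih, h]; ring
    · simp [List.foldl_cons, ih, PySem.Dict.getD_insert, h, Ne.symm h]

-- A's loop body, written branchless (the else-branch inserts p.2 = 0 + p.2)
theorem pv_step_eq :
    (fun (d : PySem.Dict String Int) (p : String × Int) =>
        if d.contains p.1 then d.insert p.1 (d.getD p.1 0 + p.2) else d.insert p.1 p.2)
    = fun d p => d.insert p.1 (d.getD p.1 0 + p.2) := by
  funext d p
  by_cases h : d.contains p.1
  · simp [h]
  · simp [h, PySem.Dict.getD_of_not_contains d 0 (by simpa using h)]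

-- the keys of the accumulated dict are the distinct IPs in first-occurrence order
theorem pv_keys_foldl (l : List (String × Int)) :
    ((l.foldl (fun d p => d.insert p.1 (d.getD p.1 0 + p.2)) PySem.Dict.empty).keys)
    = PySem.List.dedup (l.map (fun p => p.1)) := by
  refine (PySem.Dict.keys_foldl_insert_key l (fun p => p.1)
      (fun d p => d.getD p.1 0 + p.2) PySem.Dict.empty).trans ?_
  simp [PySem.Dict.keys_empty, PySem.Set.update, PySem.List.dedup_eq_ofList,
        PySem.Set.ofList_eq_foldl]

-- Set.add commutes with an absent cons'd head
theorem pv_add_cons (k x : String) (s : List String) (hx : x ≠ k) :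
    PySem.Set.add (k :: s) x = k :: PySem.Set.add s x := by
  simp only [PySem.Set.add, PySem.Set.contains, List.contains_cons]
  have hxk : (x == k) = false := by simpa using hx
  rw [hxk]
  by_cases h : x ∈ s <;> simp [h]

theorem pv_foldl_add_cons (k : String) (xs : List String) (s : List String) (hk : k ∉ xs) :
    xs.foldl PySem.Set.add (k :: s) = k :: xs.foldl PySem.Set.add s := by
  induction xs generalizing s with
  | nil => rfl
  | cons x t ih =>
    have hx : x ≠ k := fun h => hk (h ▸ List.mem_cons_self)
    have hk' : k ∉ t := fun h => hk (List.mem_cons_of_mem _ h)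
    simp only [List.foldl_cons, pv_add_cons k x s hx]
    exact ih (PySem.Set.add s x) hk'

theorem pv_foldl_add_self (k : String) (xs : List String) (h : ∀ x ∈ xs, x = k) :
    xs.foldl PySem.Set.add [k] = [k] := by
  induction xs with
  | nil => rfl
  | cons x t ih =>
    have hx : x = k := h x List.mem_cons_self
    have hadd : PySem.Set.add [k] x = [k] := by
      simp [PySem.Set.add, PySem.Set.contains, hx]
    simp only [List.foldl_cons, hadd]
    exact ih (fun y hy => h y (List.mem_cons_of_mem _ hy))

-- dedup of a key list that starts with a full run of k, with k absent afterwards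
theorem pv_dedup_run (k : String) (xs₁ xs₂ : List String)
    (h1 : ∀ x ∈ xs₁, x = k) (h2 : k ∉ xs₂) :
    PySem.List.dedup (k :: (xs₁ ++ xs₂)) = k :: PySem.List.dedup xs₂ := by
  rw [PySem.List.dedup_eq_ofList, PySem.List.dedup_eq_ofList,
      PySem.Set.ofList_eq_foldl, PySem.Set.ofList_eq_foldl]
  have hstart : PySem.Set.add [] k = [k] := rfl
  rw [List.foldl_cons, hstart, List.foldl_append, pv_foldl_add_self k xs₁ h1]
  exact pv_foldl_add_cons k xs₂ [] h2

-- on a key-sorted list, the run scan produces exactly the per-distinct-key filtered sums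
theorem pv_groupSums_eq (l : List (String × Int))
    (h : l.Pairwise (fun a b => a.1 ≤ b.1)) :
    pvGroupSums l = (PySem.List.dedup (l.map (fun p => p.1))).map
      (fun k => ((l.filter (fun p => p.1 == k)).map (fun p => p.2)).sum) := by
  induction l using pvGroupSums.induct with
  | case1 => simp [pvGroupSums]
  | case2 k c t ih =>
    rw [List.pairwise_cons] at h
    obtain ⟨hhead, htp⟩ := h
    have ht : t.takeWhile (fun p => p.1 == k) ++ t.dropWhile (fun p => p.1 == k) = t :=
      List.takeWhile_append_dropWhile
    have h1 : ∀ p ∈ t.takeWhile (fun p => p.1 == k), p.1 = k := by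
      intro p hp; simpa using List.mem_takeWhile_imp hp
    have hpt₂ : (t.dropWhile (fun p => p.1 == k)).Pairwise (fun a b => a.1 ≤ b.1) :=
      List.Pairwise.sublist (List.dropWhile_sublist _) htp
    have h2 : ∀ p ∈ t.dropWhile (fun p => p.1 == k), p.1 ≠ k := by
      cases ht2 : t.dropWhile (fun p => p.1 == k) with
      | nil => simp
      | cons q r =>
        have hq : (q.1 == k) = false := by
          have := List.head?_dropWhile_not (fun p : String × Int => p.1 == k) t
          rw [ht2] at this
          simpa using this
        have hqne : q.1 ≠ k := by simpa using hq
        have hqmem : q ∈ t := (List.dropWhile_sublist _).subset (ht2 ▸ List.mem_cons_self)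
        have hqk : k < q.1 := lt_of_le_of_ne (hhead q hqmem) (Ne.symm hqne)
        have hqr : ∀ p ∈ r, q.1 ≤ p.1 := by
          have := ht2 ▸ hpt₂
          rw [List.pairwise_cons] at this
          exact this.1
        intro p hp
        rcases List.mem_cons.mp hp with rfl | hpr
        · exact hqne
        · exact fun hpk => absurd (lt_of_lt_of_le hqk (hqr p hpr)) (by rw [hpk]; exact lt_irrefl k)
    have hfk : (((k, c) :: t).filter (fun p => p.1 == k)) = (k, c) :: t.takeWhile (fun p => p.1 == k) := by
      conv_lhs => rw [← ht]
      rw [List.filter_cons]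
      simp only [beq_self_eq_true, List.filter_append]
      rw [List.filter_eq_self.mpr (fun p hp => by simpa using h1 p hp),
          List.filter_eq_nil_iff.mpr (fun p hp => by simpa using h2 p hp)]
      simp
    have hfilter' : ∀ k', k' ≠ k →
        (((k, c) :: t).filter (fun p => p.1 == k')) = (t.dropWhile (fun p => p.1 == k)).filter (fun p => p.1 == k') := by
      intro k' hk'
      conv_lhs => rw [← ht]
      rw [List.filter_cons]
      have : ((k, c).1 == k') = false := by simpa using fun h => hk' h.symm
      rw [this]
      simp only [List.filter_append]
      rw [List.filter_eq_nil_iff.mpr (fun p hp => by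
        have := h1 p hp
        simpa [this] using fun h => hk' h.symm)]
      simp
    have hd : PySem.List.dedup (((k, c) :: t).map (fun p => p.1))
        = k :: PySem.List.dedup ((t.dropWhile (fun p => p.1 == k)).map (fun p => p.1)) := by
      have hmap : ((k, c) :: t).map (fun p => p.1)
          = k :: ((t.takeWhile (fun p => p.1 == k)).map (fun p => p.1)
              ++ (t.dropWhile (fun p => p.1 == k)).map (fun p => p.1)) := by
        rw [← List.map_append, ht]
        simp
      rw [hmap]
      refine pv_dedup_run k _ _ ?_ ?_
      · intro x hx
        obtain ⟨p, hp, rfl⟩ := List.mem_map.mp hx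
        exact h1 p hp
      · intro hk
        obtain ⟨p, hp, hpk⟩ := List.mem_map.mp hk
        exact h2 p hp hpk
    rw [pvGroupSums, hd, ih hpt₂, List.map_cons]
    congr 1
    · rw [hfk]
      simp
    · refine List.map_congr_left ?_
      intro k' hk'
      have hk'mem : k' ∈ (t.dropWhile (fun p => p.1 == k)).map (fun p => p.1) :=
        (PySem.List.mem_dedup _ _).mp hk'
      obtain ⟨p, hp, hpk⟩ := List.mem_map.mp hk'mem
      have hk'ne : k' ≠ k := hpk ▸ h2 p hp
      rw [hfilter' k' hk'ne]

-- the whole pipeline, stated over the zipped pair list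
theorem pv_main (l : List (String × Int)) :
    (PySem.List.max?
        ((l.foldl (fun d p => d.insert p.1 (d.getD p.1 0 + p.2)) PySem.Dict.empty).keys)
        (fun k => (l.foldl (fun d p => d.insert p.1 (d.getD p.1 0 + p.2)) PySem.Dict.empty).getD k 0)).elim 0
      (fun k => (l.foldl (fun d p => d.insert p.1 (d.getD p.1 0 + p.2)) PySem.Dict.empty).getD k 0)
    = (PySem.List.max? (pvGroupSums (PySem.List.sorted l (fun p => p.1) false)) (fun x => x)).elim 0
        (fun m => m) := by
  set d := l.foldl (fun d p => d.insert p.1 (d.getD p.1 0 + p.2)) PySem.Dict.empty with hd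
  set sl := PySem.List.sorted l (fun p => p.1) false with hsl
  have hperm : sl.Perm l := PySem.List.sorted_perm l (fun p => p.1) false
  have hval : ∀ k, d.getD k 0 = ((l.filter (fun p => p.1 == k)).map (fun p => p.2)).sum := by
    intro k
    simpa [PySem.Dict.getD_empty] using pv_getD_foldl_insert_sum l PySem.Dict.empty k
  have hsum : ∀ k, ((sl.filter (fun p => p.1 == k)).map (fun p => p.2)).sum = d.getD k 0 := by
    intro k
    rw [hval k]
    exact ((hperm.filter (fun p => p.1 == k)).map (fun p => p.2)).sum_eq
  have hB : pvGroupSums sl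
      = (PySem.List.dedup (sl.map (fun p => p.1))).map (fun k => d.getD k 0) := by
    rw [pv_groupSums_eq sl (PySem.List.sorted_pairwise l (fun p => p.1))]
    exact List.map_congr_left (fun k _ => hsum k)
  have hkeysperm : (PySem.List.dedup (sl.map (fun p => p.1))).Perm d.keys := by
    rw [pv_keys_foldl l]
    rw [List.perm_ext_iff_of_nodup (PySem.List.nodup_dedup _) (PySem.List.nodup_dedup _)]
    intro a
    rw [PySem.List.mem_dedup, PySem.List.mem_dedup]
    constructor
    · intro h
      obtain ⟨p, hp, rfl⟩ := List.mem_map.mp h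
      exact List.mem_map.mpr ⟨p, hperm.subset hp, rfl⟩
    · intro h
      obtain ⟨p, hp, rfl⟩ := List.mem_map.mp h
      exact List.mem_map.mpr ⟨p, hperm.mem_iff.mpr hp, rfl⟩
  rw [pv_elim_max_map d.keys (fun k => d.getD k 0), hB]
  exact (pv_max_perm _ _ (hkeysperm.map (fun k => d.getD k 0))).symm

theorem max_session_count_eq_alt (cs : List Int) (ips : List String) :
    max_session_count cs ips = max_session_count_alt cs ips := by
  unfold max_session_count max_session_count_alt
  rw [pv_step_eq]
  exact pv_main (ips.zip cs)

-- ===== VERDICT (by name: the statement is the Claim_ definition above) =====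
theorem max_session_count_spec : Claim_equal_max_session_count := by
  intro cs ips _ _
  unfold Spec_max_session_count
  exact max_session_count_eq_alt cs ips
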